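-- pv_equiv track=rewrite | github.com/pypi-data/pypi-mirror-299 | packages/molbar/molbar-1.1.3-cp39-cp39-macosx_11_0_arm64.whl/molbar/molgraph/cycles.py | _get_minimal_cycle_sizes
-- ===== SOURCE A (Python) =====
-- from collections import defaultdict
--
-- def _get_minimal_cycle_sizes(cycles):
--
--     # Create a dictionary with the smallest ring size for each ring atom
--     minimum_ring_size_per_atom = defaultdict(lambda: float("inf"))
--
--     # Loop over all rings in the cycle basis
--     for cycle in cycles:
--         # Loop over all atoms in the ring
--         for atom in cycle:
--             # Update the smallest ring size for each atom in the ring, if the current ring is smaller than the stored smallest ring size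
--             minimum_ring_size_per_atom[atom] = min(
--                 len(cycle), minimum_ring_size_per_atom[atom]
--             )
--     # Return the dictionary
--     return dict(minimum_ring_size_per_atom)
-- ===== SOURCE B (Python) =====
-- def _get_minimal_cycle_sizes(cycles):
--     # atoms in first-occurrence order, then one min() per atom over the cycles containing it
--     atoms = dict.fromkeys(a for cycle in cycles for a in cycle)
--     return {a: min(len(c) for c in cycles if a in c) for a in atoms}
-- ===== Notes on version B (the rewrite author's own statement) =====
-- stated objective: alternative
-- what changed: A maintains a running minimum per atom in a defaultdict while looping over cycles; B instead collects the atoms once in first-occurrence order with dict.fromkeys and computes each atom's value independently as min(len(c) for cycles containing it).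
import Mathlib
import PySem

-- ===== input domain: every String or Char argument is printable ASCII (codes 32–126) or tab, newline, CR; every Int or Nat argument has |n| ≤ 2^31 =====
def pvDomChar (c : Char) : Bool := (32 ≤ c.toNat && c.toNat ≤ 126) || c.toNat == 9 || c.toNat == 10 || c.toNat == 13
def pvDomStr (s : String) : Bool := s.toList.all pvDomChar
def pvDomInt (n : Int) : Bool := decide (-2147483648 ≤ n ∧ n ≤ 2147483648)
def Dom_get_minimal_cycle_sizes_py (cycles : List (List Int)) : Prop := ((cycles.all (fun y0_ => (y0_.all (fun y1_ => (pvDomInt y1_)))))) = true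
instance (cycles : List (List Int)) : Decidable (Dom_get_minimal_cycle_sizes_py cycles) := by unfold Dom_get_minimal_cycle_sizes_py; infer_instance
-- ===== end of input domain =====

-- B replaces A's running-min dict update inside the cycle loop by one ordered key pass
-- (dict.fromkeys) plus an independent min() per atom over the cycles containing it (objective: alternative).

-- ===== PORT A =====
-- min(len(cycle), minimum_ring_size_per_atom[atom]) with the defaultdict's float("inf") default:
-- a missing key means the min is len(cycle); the value stored is always an int.
def get_minimal_cycle_sizes_py (cycles : List (List Int)) : List (Int × Int) :=
  (cycles.foldl
    (fun d cycle =>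
      cycle.foldl
        (fun d atom =>
          d.insert atom
            (match d.get? atom with
             | none => (cycle.length : Int)
             | some v => min (cycle.length : Int) v))
        d)
    (PySem.Dict.empty (κ := Int) (ν := Int))).items

-- ===== PORT B =====
-- min() over a nonempty generator: every atom comes from some cycle, so the filtered list is
-- nonempty and the .getD 0 default is never reached.
def get_minimal_cycle_sizes_py_alt (cycles : List (List Int)) : List (Int × Int) :=
  (PySem.List.dedup cycles.flatten).map
    (fun a =>
      (a, (PySem.List.min? ((cycles.filter (fun c => c.contains a)).map (fun c => (c.length : Int)))
             (fun x => x)).getD 0))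

-- ===== PRECONDITION & SPEC =====
def Spec_get_minimal_cycle_sizes_py (cycles : List (List Int)) (out : List (Int × Int)) : Prop := out = get_minimal_cycle_sizes_py_alt cycles
instance (cycles : List (List Int)) (out : List (Int × Int)) : Decidable (Spec_get_minimal_cycle_sizes_py cycles out) := by unfold Spec_get_minimal_cycle_sizes_py; infer_instance

-- ===== CLAIM (what is proved, stated in full; the proofs are below) =====
def Claim_equal_get_minimal_cycle_sizes_py : Prop := ∀ (cycles : List (List Int)), Dom_get_minimal_cycle_sizes_py cycles → Spec_get_minimal_cycle_sizes_py cycles (get_minimal_cycle_sizes_py cycles)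

-- ===== LEMMAS AND PROOFS =====

-- the value A stores for `atom` when a cycle of length L is processed
def pvCombine (L : Int) (m : Option Int) : Int :=
  match m with
  | none => L
  | some v => min L v

-- one inner loop of A (over the atoms of a cycle of length L), effect on a single lookup
theorem pv_inner_get? (as : List Int) (L : Int) (d : PySem.Dict Int Int) (a : Int) :
    (as.foldl (fun d atom => d.insert atom (pvCombine L (d.get? atom))) d).get? a
      = if a ∈ as then some (pvCombine L (d.get? a)) else d.get? a := by
  induction as generalizing d with
  | nil => simp
  | cons x t ih =>
    simp only [List.foldl_cons, ih, PySem.Dict.get?_insert, List.mem_cons]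
    by_cases hax : a = x
    · subst hax
      simp only [true_or, if_pos]
      by_cases hat : a ∈ t
      · simp only [if_pos hat]
        cases h : d.get? a <;> simp [pvCombine]
      · simp [hat]
    · simp only [if_neg hax]
      by_cases hat : a ∈ t <;> simp [hat, hax]

-- A's whole fold, effect on a single lookup: a left fold of pvCombine over the cycles containing a
theorem pv_outer_get? (cs : List (List Int)) (d : PySem.Dict Int Int) (a : Int) :
    ((cs.foldl (fun d cycle =>
        cycle.foldl (fun d atom => d.insert atom (pvCombine (cycle.length : Int) (d.get? atom))) d) d).get? a)
      = cs.foldl (fun m c => if a ∈ c then some (pvCombine (c.length : Int) m) else m) (d.get? a) := by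
  induction cs generalizing d with
  | nil => rfl
  | cons c t ih => simp only [List.foldl_cons, ih, pv_inner_get?]

theorem pv_foldl_combine_some (t : List Int) (x : Int) :
    t.foldl (fun m L => some (pvCombine L m)) (some x) = some (t.foldl min x) := by
  induction t generalizing x with
  | nil => rfl
  | cons y t ih =>
    simp only [List.foldl_cons]
    show List.foldl _ (some (pvCombine y (some x))) t = some (List.foldl min (min x y) t)
    rw [show pvCombine y (some x) = min x y from min_comm y x, ih]

-- the combine-fold over the lengths of the cycles containing a IS B's min?
theorem pv_fold_eq_min? (cs : List (List Int)) (a : Int) :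
    cs.foldl (fun m c => if a ∈ c then some (pvCombine (c.length : Int) m) else m) none
      = PySem.List.min? ((cs.filter (fun c => c.contains a)).map (fun c => (c.length : Int))) (fun x => x) := by
  have key : ∀ (ls : List (List Int)) (m : Option Int),
      ls.foldl (fun m c => if a ∈ c then some (pvCombine (c.length : Int) m) else m) m
        = ((ls.filter (fun c => c.contains a)).map (fun c => (c.length : Int))).foldl
            (fun m L => some (pvCombine L m)) m := by
    intro ls
    induction ls with
    | nil => intro m; rfl
    | cons c t ih =>
      intro m
      by_cases h : a ∈ c
      · simp [h, ih]
      · simp [h, ih]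
  rw [key]
  cases hls : (cs.filter (fun c => c.contains a)).map (fun c => (c.length : Int)) with
  | nil => rfl
  | cons x t =>
    rw [PySem.List.min?_id_cons, List.foldl_cons, pv_foldl_combine_some]
    rfl

-- keys of A's dict: first-occurrence order of all atoms
theorem pv_keys (cs : List (List Int)) (d : PySem.Dict Int Int) :
    (cs.foldl (fun d cycle =>
        cycle.foldl (fun d atom => d.insert atom (pvCombine (cycle.length : Int) (d.get? atom))) d) d).keys
      = PySem.Set.update d.keys cs.flatten := by
  induction cs generalizing d with
  | nil => simp [PySem.Set.update]
  | cons c t ih =>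
    simp only [List.foldl_cons, ih, PySem.Dict.keys_foldl_insert, List.flatten_cons,
      PySem.Set.update_append]

theorem pv_nodup_keys (cs : List (List Int)) (d : PySem.Dict Int Int) (h : d.keys.Nodup) :
    (cs.foldl (fun d cycle =>
        cycle.foldl (fun d atom => d.insert atom (pvCombine (cycle.length : Int) (d.get? atom))) d) d).keys.Nodup := by
  induction cs generalizing d with
  | nil => exact h
  | cons c t ih =>
    exact ih _ (PySem.Dict.nodup_keys_foldl_insert c _ d h)

-- ===== VERDICT (by name: the statement is the Claim_ definition above) =====
theorem get_minimal_cycle_sizes_py_spec : Claim_equal_get_minimal_cycle_sizes_py := by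
  intro cycles _
  show get_minimal_cycle_sizes_py cycles = get_minimal_cycle_sizes_py_alt cycles
  unfold get_minimal_cycle_sizes_py get_minimal_cycle_sizes_py_alt
  have hfold :
      (cycles.foldl (fun d cycle =>
          cycle.foldl (fun d atom =>
            d.insert atom (match d.get? atom with
                           | none => (cycle.length : Int)
                           | some v => min (cycle.length : Int) v)) d)
        (PySem.Dict.empty (κ := Int) (ν := Int)))
      = (cycles.foldl (fun d cycle =>
          cycle.foldl (fun d atom => d.insert atom (pvCombine (cycle.length : Int) (d.get? atom))) d)
        (PySem.Dict.empty (κ := Int) (ν := Int))) := rfl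
  rw [hfold]
  set D := (cycles.foldl (fun d cycle =>
      cycle.foldl (fun d atom => d.insert atom (pvCombine (cycle.length : Int) (d.get? atom))) d)
    (PySem.Dict.empty (κ := Int) (ν := Int))) with hD
  have hnd : D.keys.Nodup := pv_nodup_keys cycles _ (by simp)
  have hkeys : D.keys = PySem.List.dedup cycles.flatten := by
    rw [hD, pv_keys]
    simp [PySem.Set.update_nil_left]
  rw [PySem.Dict.items_eq_map_keys D hnd 0, hkeys]
  apply List.map_congr_left
  intro a _
  have hget : D.get? a
      = PySem.List.min? ((cycles.filter (fun c => c.contains a)).map (fun c => (c.length : Int))) (fun x => x) := by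
    rw [hD, pv_outer_get?]
    simpa using pv_fold_eq_min? cycles a
  rw [PySem.Dict.getD_eq_get?_getD, hget]
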